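-- pv_equiv track=rewrite | github.com/ncl17/widnode-dev | widnode-supervisor/userapp/app-calibracion.py | summarize_measure_array
-- ===== SOURCE A (Python) =====
-- from typing import Dict, Set,Iterable, List, Tuple
--
-- def _compress_ranges(indices: List[int]) -> List[Tuple[int, int]]:
--     """Comprime [2,3,4,7] -> [(2,4),(7,7)]"""
--     if not indices:
--         return []
--     res = []
--     start = prev = indices[0]
--     for x in indices[1:]:
--         if x == prev + 1:
--             prev = x
--         else:
--             res.append((start, prev))
--             start = prev = x
--     res.append((start, prev))
--     return res
--
-- def summarize_measure_array(arr: Iterable[int], base_offset: int = 2, preview: int = 100):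
--     """
--     Devuelve:
--       - ones: cantidad de 1s
--       - zeros: cantidad de 0s
--       - ranges_str: rangos de índices (ya con offset del dispositivo)
--       - colored_line: string con 0/1 donde el 1 va en color (primeros N)
--       - ones_idx_dev: lista de índices *del dispositivo* con 1 (offset aplicado)
--     """
--     arr = list(arr)
--     ones_idx = [i for i, v in enumerate(arr) if v == 1]
--     ones = len(ones_idx)
--     zeros = len(arr) - ones
--
--     ones_idx_dev = [i + base_offset for i in ones_idx]
--     ranges = _compress_ranges(ones_idx_dev)
--     ranges_str = ", ".join(f"{a}" if a == b else f"{a}-{b}" for a, b in ranges) if ranges else "-"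
--
--
--     return ones, zeros, ranges_str, ones_idx_dev
-- ===== SOURCE B (Python) =====
-- def summarize_measure_array(arr, base_offset: int = 2, preview: int = 100):
--     """Single pass: count ones, collect device indices and compress runs on the fly."""
--     arr = list(arr)
--     ones = 0
--     ones_idx_dev = []
--     parts = []
--     start = prev = None
--     for i, v in enumerate(arr):
--         if v == 1:
--             d = i + base_offset
--             ones += 1
--             ones_idx_dev.append(d)
--             if start is None:
--                 start = prev = d
--             elif d == prev + 1:
--                 prev = d
--             else:
--                 parts.append(f"{start}" if start == prev else f"{start}-{prev}")
--                 start = prev = d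
--     if start is not None:
--         parts.append(f"{start}" if start == prev else f"{start}-{prev}")
--     ranges_str = ", ".join(parts) if parts else "-"
--     return ones, len(arr) - ones, ranges_str, ones_idx_dev
-- ===== Notes on version B (the rewrite author's own statement) =====
-- stated objective: faster
-- what changed: B replaces A's two-pass build-ones_idx-then-_compress_ranges structure with a single scan over arr that counts ones, collects device indices and compresses consecutive runs on the fly, formatting each range as it closes; the intermediate ones_idx list, the extra map pass and the separate compress pass disappear (measured ~1.7x at large n).
import Mathlib
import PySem

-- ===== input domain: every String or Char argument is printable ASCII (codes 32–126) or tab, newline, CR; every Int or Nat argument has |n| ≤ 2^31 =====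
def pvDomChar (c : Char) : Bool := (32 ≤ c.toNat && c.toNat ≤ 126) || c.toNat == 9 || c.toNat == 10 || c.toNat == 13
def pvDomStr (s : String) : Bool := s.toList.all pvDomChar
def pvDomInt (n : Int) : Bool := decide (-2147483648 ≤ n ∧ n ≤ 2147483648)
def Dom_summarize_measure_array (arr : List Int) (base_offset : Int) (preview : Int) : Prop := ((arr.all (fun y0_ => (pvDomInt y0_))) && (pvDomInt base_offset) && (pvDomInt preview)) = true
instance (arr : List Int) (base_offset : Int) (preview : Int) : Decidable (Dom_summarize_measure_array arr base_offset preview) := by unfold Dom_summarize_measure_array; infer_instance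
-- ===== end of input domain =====

-- B collapses A's build-then-compress two-pass structure into one scan that counts,
-- collects device indices and compresses runs on the fly in one pass (objective: faster, constant factor).
-- ===== PORT A =====
-- f"{a}" / f"{a}-{b}" (exact: str() via PySem.Int.toChars, literal '-')
def pvFmt (a b : Int) : String :=
  if a = b then PySem.Int.toStr a
  else String.mk (PySem.Int.toChars a ++ '-' :: PySem.Int.toChars b)

def pvCStep (s : List (Int × Int) × Int × Int) (x : Int) : List (Int × Int) × Int × Int :=
  if x = s.2.2 + 1 then (s.1, s.2.1, x) else (s.1 ++ [(s.2.1, s.2.2)], x, x)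

def _compress_ranges (indices : List Int) : List (Int × Int) :=
  match indices with
  | [] => []
  | i0 :: rest =>
    let s := rest.foldl pvCStep ([], i0, i0)
    s.1 ++ [(s.2.1, s.2.2)]

def summarize_measure_array (arr : List Int) (base_offset : Int) (preview : Int) : Int × Int × String × List Int :=
  let ones_idx : List Int := (PySem.List.enumerate arr).filterMap (fun p => if p.2 = 1 then some p.1 else none)
  let ones : Int := (ones_idx.length : Int)
  let zeros : Int := (arr.length : Int) - ones
  let ones_idx_dev := ones_idx.map (fun i => i + base_offset)
  let ranges := _compress_ranges ones_idx_dev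
  let ranges_str := if ranges = [] then "-" else PySem.Str.join ", " (ranges.map (fun r => pvFmt r.1 r.2))
  (ones, zeros, ranges_str, ones_idx_dev)

-- ===== PORT B =====
def pvRunStep (parts : List String) (run : Option (Int × Int)) (d : Int) : List String × Option (Int × Int) :=
  match run with
  | none => (parts, some (d, d))
  | some (st, pr) =>
    if d = pr + 1 then (parts, some (st, d))
    else (parts ++ [pvFmt st pr], some (d, d))

def pvStepB (base_offset : Int) (s : Int × List Int × List String × Option (Int × Int))
    (p : Int × Int) : Int × List Int × List String × Option (Int × Int) :=
  if p.2 = 1 then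
    let d := p.1 + base_offset
    let r := pvRunStep s.2.2.1 s.2.2.2 d
    (s.1 + 1, s.2.1 ++ [d], r.1, r.2)
  else s

def summarize_measure_array_alt (arr : List Int) (base_offset : Int) (preview : Int) : Int × Int × String × List Int :=
  let s := (PySem.List.enumerate arr).foldl (pvStepB base_offset) (0, [], [], none)
  let parts :=
    match s.2.2.2 with
    | none => s.2.2.1
    | some (st, pr) => s.2.2.1 ++ [pvFmt st pr]
  let ranges_str := if parts = [] then "-" else PySem.Str.join ", " parts
  (s.1, (arr.length : Int) - s.1, ranges_str, s.2.1)
-- ===== PRECONDITION & SPEC =====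
def Spec_summarize_measure_array (arr : List Int) (base_offset : Int) (preview : Int) (out : Int × Int × String × List Int) : Prop := out = summarize_measure_array_alt arr base_offset preview
instance (arr : List Int) (base_offset : Int) (preview : Int) (out : Int × Int × String × List Int) : Decidable (Spec_summarize_measure_array arr base_offset preview out) := by unfold Spec_summarize_measure_array; infer_instance

-- ===== CLAIM (what is proved, stated in full; the proofs are below) =====
def Claim_equal_summarize_measure_array : Prop := ∀ (arr : List Int) (base_offset : Int) (preview : Int), Dom_summarize_measure_array arr base_offset preview → Spec_summarize_measure_array arr base_offset preview (summarize_measure_array arr base_offset preview)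

-- ===== LEMMAS AND PROOFS =====
-- run-compression step of B, already specialised to a device index d
def pvStepD (s : Int × List Int × List String × Option (Int × Int)) (d : Int) :
    Int × List Int × List String × Option (Int × Int) :=
  (s.1 + 1, s.2.1 ++ [d], (pvRunStep s.2.2.1 s.2.2.2 d).1, (pvRunStep s.2.2.1 s.2.2.2 d).2)

lemma stepD_none (n : Int) (acc : List Int) (parts : List String) (d : Int) :
    pvStepD (n, acc, parts, none) d = (n + 1, acc ++ [d], parts, some (d, d)) := rfl

lemma stepD_ext (n : Int) (acc : List Int) (parts : List String) (st pr d : Int) (h : d = pr + 1) :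
    pvStepD (n, acc, parts, some (st, pr)) d = (n + 1, acc ++ [d], parts, some (st, d)) := by
  simp [pvStepD, pvRunStep, h]

lemma stepD_new (n : Int) (acc : List Int) (parts : List String) (st pr d : Int) (h : ¬ d = pr + 1) :
    pvStepD (n, acc, parts, some (st, pr)) d
      = (n + 1, acc ++ [d], parts ++ [pvFmt st pr], some (d, d)) := by
  simp [pvStepD, pvRunStep, h]

lemma cstep_ext (res : List (Int × Int)) (st pr x : Int) (h : x = pr + 1) :
    pvCStep (res, st, pr) x = (res, st, x) := by simp [pvCStep, h]

lemma cstep_new (res : List (Int × Int)) (st pr x : Int) (h : ¬ x = pr + 1) :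
    pvCStep (res, st, pr) x = (res ++ [(st, pr)], x, x) := by simp [pvCStep, h]

-- B's fold over enumerate arr acts exactly on the device indices of the ones
lemma foldB_eq (b : Int) : ∀ (xs : List Int) (k : Int) (s : Int × List Int × List String × Option (Int × Int)),
    (PySem.List.enumerate xs k).foldl (pvStepB b) s
      = (((PySem.List.enumerate xs k).filterMap (fun p => if p.2 = 1 then some p.1 else none)).map
          (fun i => i + b)).foldl pvStepD s := by
  intro xs
  induction xs with
  | nil => intro k s; simp [PySem.List.enumerate_nil]
  | cons x xs ih =>
    intro k s
    rw [PySem.List.enumerate_cons]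
    by_cases hx : x = 1
    · simp only [hx, List.foldl_cons, List.filterMap_cons, ih]
      rfl
    · simp only [List.foldl_cons, List.filterMap_cons, if_neg hx, ih]
      simp [pvStepB, hx]

-- the open-run invariant: B's fold over device indices mirrors A's compress fold
lemma run_corr : ∀ (ds : List Int) (res : List (Int × Int)) (st pr n : Int) (acc : List Int),
    ds.foldl pvStepD (n, acc, res.map (fun r => pvFmt r.1 r.2), some (st, pr))
      = (n + (ds.length : Int), acc ++ ds,
         (ds.foldl pvCStep (res, st, pr)).1.map (fun r => pvFmt r.1 r.2),
         some ((ds.foldl pvCStep (res, st, pr)).2.1, (ds.foldl pvCStep (res, st, pr)).2.2)) := by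
  intro ds
  induction ds with
  | nil => intro res st pr n acc; simp
  | cons d ds ih =>
    intro res st pr n acc
    by_cases hd : d = pr + 1
    · rw [List.foldl_cons, List.foldl_cons, stepD_ext _ _ _ _ _ _ hd, cstep_ext _ _ _ _ hd,
        ih res st d (n + 1) (acc ++ [d])]
      simp only [List.length_cons, List.append_assoc, List.singleton_append, Prod.mk.injEq,
        and_true, true_and]
      push_cast
      omega
    · rw [List.foldl_cons, List.foldl_cons, stepD_new _ _ _ _ _ _ hd, cstep_new _ _ _ _ hd]
      have hmap : (res.map (fun r => pvFmt r.1 r.2)) ++ [pvFmt st pr]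
          = (res ++ [(st, pr)]).map (fun r => pvFmt r.1 r.2) := by simp
      rw [hmap, ih (res ++ [(st, pr)]) d d (n + 1) (acc ++ [d])]
      simp only [List.length_cons, List.append_assoc, List.singleton_append, Prod.mk.injEq,
        and_true, true_and]
      push_cast
      omega

-- assembling B's final state from the device-index list
lemma assemble (ds : List Int) :
    (ds.foldl pvStepD (0, [], [], none)).1 = (ds.length : Int) ∧
    (ds.foldl pvStepD (0, [], [], none)).2.1 = ds ∧
    (if _compress_ranges ds = [] then "-"
       else PySem.Str.join ", " ((_compress_ranges ds).map (fun r => pvFmt r.1 r.2)))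
      = (if (match (ds.foldl pvStepD (0, [], [], none)).2.2.2 with
              | none => (ds.foldl pvStepD (0, [], [], none)).2.2.1
              | some (st, pr) => (ds.foldl pvStepD (0, [], [], none)).2.2.1 ++ [pvFmt st pr]) = []
         then "-"
         else PySem.Str.join ", "
           (match (ds.foldl pvStepD (0, [], [], none)).2.2.2 with
            | none => (ds.foldl pvStepD (0, [], [], none)).2.2.1
            | some (st, pr) => (ds.foldl pvStepD (0, [], [], none)).2.2.1 ++ [pvFmt st pr])) := by
  cases ds with
  | nil => simp [_compress_ranges]
  | cons d rest =>
    rw [List.foldl_cons, stepD_none]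
    simp only [zero_add, List.nil_append]
    have hrc := run_corr rest [] d d 1 [d]
    simp only [List.map_nil] at hrc
    rw [hrc]
    refine ⟨by simp; ring, by simp, ?_⟩
    have hne : _compress_ranges (d :: rest) ≠ [] := by simp [_compress_ranges]
    rw [if_neg hne]
    have hc : _compress_ranges (d :: rest)
        = (rest.foldl pvCStep ([], d, d)).1
            ++ [((rest.foldl pvCStep ([], d, d)).2.1, (rest.foldl pvCStep ([], d, d)).2.2)] := rfl
    rw [hc]
    simp

-- ===== VERDICT =====
theorem summarize_measure_array_spec : Claim_equal_summarize_measure_array := by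
  intro arr base_offset preview _
  unfold Spec_summarize_measure_array summarize_measure_array summarize_measure_array_alt
  rw [foldB_eq]
  obtain ⟨h1, h2, h3⟩ := assemble
    (((PySem.List.enumerate arr 0).filterMap (fun p => if p.2 = 1 then some p.1 else none)).map
      (fun i => i + base_offset))
  rw [List.length_map] at h1
  simp only [h1, h2, Prod.mk.injEq]
  set F := List.foldl pvStepD (0, [], [], none) (((PySem.List.enumerate arr 0).filterMap (fun p => if p.2 = 1 then some p.1 else none)).map (fun i => i + base_offset))
  exact ⟨trivial, trivial, h3, trivial⟩
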